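-- pv_equiv track=rewrite | github.com/gaggio23/my-python-modules | modules/math.py | get_pythagorian_triples
-- ===== SOURCE A (Python) =====
-- import math
--
-- def get_pythagorian_triples(sides_sum):
-- 	pythagorian_triples = []
-- 	for n in range(1, sides_sum):
-- 		for m in range(n + 1, sides_sum):
-- 			if (((m + n) % 2) != 0) and (math.gcd(m, n) == 1):
-- 				for k in range(1, sides_sum):
-- 					a = k * (m ** 2 - n ** 2)
-- 					b = k * (2 * m * n)
-- 					c = k * (m ** 2 + n ** 2)
-- 					if (a + b + c) == sides_sum:
-- 						pythagorian_triples.append((a, b, c))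
-- 					elif (a + b + c) > sides_sum:
-- 						break
-- 	return pythagorian_triples
-- ===== SOURCE B (Python) =====
-- import math
--
-- def get_pythagorian_triples(sides_sum):
-- 	pythagorian_triples = []
-- 	if sides_sum <= 0:
-- 		return pythagorian_triples
-- 	for n in range(1, math.isqrt(sides_sum // 4) + 1):
-- 		for m in range(n + 1, math.isqrt(sides_sum // 2) + 1):
-- 			if (m + n) % 2 == 1 and math.gcd(m, n) == 1 and sides_sum % (2 * m * (m + n)) == 0:
-- 				k = sides_sum // (2 * m * (m + n))
-- 				pythagorian_triples.append((k * (m * m - n * n), k * (2 * m * n), k * (m * m + n * n)))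
-- 	return pythagorian_triples
-- ===== Notes on version B (the rewrite author's own statement) =====
-- stated objective: faster
-- what changed: A scans all O(s^2) pairs (n,m) up to sides_sum and searches k with an inner loop; B bounds n by isqrt(s//4) and m by isqrt(s//2) and solves k directly from divisibility of sides_sum by the primitive perimeter 2*m*(m+n).
import Mathlib
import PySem

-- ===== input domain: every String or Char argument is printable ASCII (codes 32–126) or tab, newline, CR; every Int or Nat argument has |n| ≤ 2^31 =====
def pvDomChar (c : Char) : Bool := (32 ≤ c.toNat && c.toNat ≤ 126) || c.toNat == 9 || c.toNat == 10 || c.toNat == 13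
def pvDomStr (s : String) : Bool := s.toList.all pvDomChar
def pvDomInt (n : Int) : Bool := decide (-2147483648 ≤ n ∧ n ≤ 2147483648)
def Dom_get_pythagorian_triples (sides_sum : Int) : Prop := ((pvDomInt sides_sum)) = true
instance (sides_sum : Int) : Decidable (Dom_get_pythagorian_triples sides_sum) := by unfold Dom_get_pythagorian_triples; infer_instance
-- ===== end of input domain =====

-- B replaces A's O(s^2)-pairs scan with inner k-loop by sqrt-bounded (m,n) ranges solving k by divisibility; equal return value proved for all inputs.

-- ===== PORT A =====
-- inner 'for k in range(1, sides_sum)' loop with its break, transcribed over the explicit range list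
def pvKloopA (s n m : Int) : List Int → List (List Int)
  | [] => []
  | k :: ks =>
    let a := k * (m ^ 2 - n ^ 2)
    let b := k * (2 * m * n)
    let c := k * (m ^ 2 + n ^ 2)
    if a + b + c = s then [a, b, c] :: pvKloopA s n m ks
    else if a + b + c > s then []
    else pvKloopA s n m ks

def get_pythagorian_triples (sides_sum : Int) : List (List Int) :=
  (PySem.List.pyRange 1 sides_sum 1).foldl (fun acc n =>
    (PySem.List.pyRange (n + 1) sides_sum 1).foldl (fun acc m =>
      if PySem.Int.mod (m + n) 2 ≠ 0 ∧ Int.gcd m n = 1 then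
        acc ++ pvKloopA sides_sum n m (PySem.List.pyRange 1 sides_sum 1)
      else acc) acc) []

-- ===== PORT B =====
-- math.isqrt (nonnegative argument) is ported as Nat.sqrt, which is exact integer sqrt
def get_pythagorian_triples_alt (sides_sum : Int) : List (List Int) :=
  if sides_sum ≤ 0 then []
  else
    (PySem.List.pyRange 1 (((PySem.Int.floordiv sides_sum 4).toNat.sqrt : Int) + 1) 1).foldl (fun acc n =>
      (PySem.List.pyRange (n + 1) (((PySem.Int.floordiv sides_sum 2).toNat.sqrt : Int) + 1) 1).foldl (fun acc m =>
        if PySem.Int.mod (m + n) 2 = 1 ∧ Int.gcd m n = 1 ∧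
            PySem.Int.mod sides_sum (2 * m * (m + n)) = 0 then
          let k := PySem.Int.floordiv sides_sum (2 * m * (m + n))
          acc ++ [[k * (m * m - n * n), k * (2 * m * n), k * (m * m + n * n)]]
        else acc) acc) []

-- ===== PRECONDITION & SPEC =====
def Spec_get_pythagorian_triples (sides_sum : Int) (out : List (List Int)) : Prop := out = get_pythagorian_triples_alt sides_sum
instance (sides_sum : Int) (out : List (List Int)) : Decidable (Spec_get_pythagorian_triples sides_sum out) := by unfold Spec_get_pythagorian_triples; infer_instance

-- ===== CLAIM (what is proved, stated in full; the proofs are below) =====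
def Claim_equal_get_pythagorian_triples : Prop := ∀ (sides_sum : Int), Dom_get_pythagorian_triples sides_sum → Spec_get_pythagorian_triples sides_sum (get_pythagorian_triples sides_sum)

-- ===== LEMMAS AND PROOFS =====

-- per-pair contribution of A (the guarded k-loop) and of B (the guarded direct solution)
def pvContribA (s n m : Int) : List (List Int) :=
  if PySem.Int.mod (m + n) 2 ≠ 0 ∧ Int.gcd m n = 1 then
    pvKloopA s n m (PySem.List.pyRange 1 s 1)
  else []

def pvContribB (s n m : Int) : List (List Int) :=
  if PySem.Int.mod (m + n) 2 = 1 ∧ Int.gcd m n = 1 ∧ PySem.Int.mod s (2 * m * (m + n)) = 0 then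
    [[(PySem.Int.floordiv s (2 * m * (m + n))) * (m * m - n * n),
      (PySem.Int.floordiv s (2 * m * (m + n))) * (2 * m * n),
      (PySem.Int.floordiv s (2 * m * (m + n))) * (m * m + n * n)]]
  else []

def pvSqrt2 (s : Int) : Int := ((PySem.Int.floordiv s 2).toNat.sqrt : Int)
def pvSqrt4 (s : Int) : Int := ((PySem.Int.floordiv s 4).toNat.sqrt : Int)

def pvRowA (s n : Int) : List (List Int) :=
  (PySem.List.pyRange (n + 1) s 1).flatMap (pvContribA s n)
def pvRowB (s n : Int) : List (List Int) :=
  (PySem.List.pyRange (n + 1) (pvSqrt2 s + 1) 1).flatMap (pvContribB s n)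

theorem pvFlatMap_congr {f g : Int → List (List Int)} :
    ∀ (l : List Int), (∀ x ∈ l, f x = g x) → l.flatMap f = l.flatMap g
  | [], _ => rfl
  | x :: l, h => by
    simp only [List.flatMap_cons, h x (List.mem_cons_self), pvFlatMap_congr l (fun y hy => h y (List.mem_cons_of_mem _ hy))]

theorem pvKloopA_char (s n m : Int) (hn : 1 ≤ n) (hm : n < m) :
    ∀ (j : Nat) (k : Int), 1 ≤ k → s - k ≤ (j : Int) →
      pvKloopA s n m (PySem.List.pyRange k s 1) =
        if 2 * m * (m + n) ∣ s ∧ k * (2 * m * (m + n)) ≤ s then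
          [[(s / (2 * m * (m + n))) * (m ^ 2 - n ^ 2),
            (s / (2 * m * (m + n))) * (2 * m * n),
            (s / (2 * m * (m + n))) * (m ^ 2 + n ^ 2)]]
        else [] := by
  have hp : 12 ≤ 2 * m * (m + n) := by nlinarith
  intro j
  induction j with
  | zero =>
    intro k hk hj
    rw [PySem.List.pyRange_one_eq_nil (by omega)]
    rw [if_neg]
    · rfl
    · rintro ⟨-, hle⟩
      have hj' : s - k ≤ 0 := by exact_mod_cast hj
      nlinarith [mul_le_mul_of_nonneg_left hp (by omega : (0:Int) ≤ k)]
  | succ j ih =>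
    intro k hk hj
    by_cases hks : s ≤ k
    · rw [PySem.List.pyRange_one_eq_nil hks]
      rw [if_neg]
      · rfl
      · rintro ⟨-, hle⟩
        nlinarith [mul_le_mul_of_nonneg_left hp (by omega : (0:Int) ≤ k)]
    · rw [PySem.List.pyRange_one_cons (by omega)]
      have habc : k * (m ^ 2 - n ^ 2) + k * (2 * m * n) + k * (m ^ 2 + n ^ 2)
          = k * (2 * m * (m + n)) := by ring
      simp only [pvKloopA, habc]
      rcases lt_trichotomy (k * (2 * m * (m + n))) s with hlt | heq | hgt
      · rw [if_neg (by omega), if_neg (by omega)]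
        rw [ih (k + 1) (by omega) (by omega)]
        by_cases hd : 2 * m * (m + n) ∣ s
        · have hstep : (k + 1) * (2 * m * (m + n)) ≤ s := by
            obtain ⟨c, hc⟩ := hd
            have hkc : k < c := by nlinarith
            nlinarith
          rw [if_pos ⟨hd, hstep⟩, if_pos ⟨hd, by nlinarith⟩]
        · rw [if_neg (by tauto), if_neg (by tauto)]
      · rw [if_pos heq]
        have hd : 2 * m * (m + n) ∣ s := Dvd.intro_left k heq
        have hdiv : s / (2 * m * (m + n)) = k := by
          rw [← heq]; exact Int.mul_ediv_cancel k (by omega)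
        rw [ih (k + 1) (by omega) (by omega), if_neg (by rintro ⟨-, h⟩; nlinarith)]
        rw [if_pos ⟨hd, by omega⟩, hdiv]
      · rw [if_neg (by omega), if_pos (by omega), if_neg (by rintro ⟨-, h⟩; omega)]

theorem pvContrib_eq (s n m : Int) (hs : 0 < s) (hn : 1 ≤ n) (hm : n < m) :
    pvContribA s n m = pvContribB s n m := by
  have hp : 12 ≤ 2 * m * (m + n) := by nlinarith
  have hk := pvKloopA_char s n m hn hm s.toNat 1 le_rfl (by omega)
  have hmod2 : (PySem.Int.mod (m + n) 2 ≠ 0) ↔ (PySem.Int.mod (m + n) 2 = 1) := by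
    have h1 := PySem.Int.mod_nonneg (m + n) (by omega : (0:Int) < 2)
    have h2 := PySem.Int.mod_lt (m + n) (by omega : (0:Int) < 2)
    omega
  have hdvd : (PySem.Int.mod s (2 * m * (m + n)) = 0) ↔ (2 * m * (m + n) ∣ s) :=
    PySem.Int.mod_eq_zero_iff_dvd s (2 * m * (m + n))
  have hfd : PySem.Int.floordiv s (2 * m * (m + n)) = s / (2 * m * (m + n)) :=
    PySem.Int.floordiv_eq_ediv_of_pos (by omega)
  unfold pvContribA pvContribB
  by_cases hpar : PySem.Int.mod (m + n) 2 = 1 <;> by_cases hgcd : Int.gcd m n = 1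
  · by_cases hd : 2 * m * (m + n) ∣ s
    · have hle : 2 * m * (m + n) ≤ s := Int.le_of_dvd hs hd
      rw [if_pos ⟨hmod2.mpr hpar, hgcd⟩, hk, if_pos ⟨hd, by omega⟩,
        if_pos ⟨hpar, hgcd, hdvd.mpr hd⟩, hfd]
      simp [pow_two]
    · rw [if_pos ⟨hmod2.mpr hpar, hgcd⟩, hk, if_neg (by tauto),
        if_neg (by rintro ⟨-, -, h⟩; exact hd (hdvd.mp h))]
  · rw [if_neg (by tauto), if_neg (by tauto)]
  · rw [if_neg (by rw [hmod2]; tauto), if_neg (by tauto)]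
  · rw [if_neg (by tauto), if_neg (by tauto)]

theorem pvContribB_nil (s n m : Int) (hs : 0 < s) (hbig : s < 2 * m * (m + n)) :
    pvContribB s n m = [] := by
  unfold pvContribB
  rw [if_neg]
  rintro ⟨-, -, h⟩
  have hd := (PySem.Int.mod_eq_zero_iff_dvd s (2 * m * (m + n))).mp h
  have := Int.le_of_dvd hs hd
  omega

theorem pvBig2 (s n m : Int) (hs : 0 < s) (hn : 1 ≤ n) (hbig : pvSqrt2 s < m) :
    s < 2 * m * (m + n) := by
  have hq : PySem.Int.floordiv s 2 = s / 2 := PySem.Int.floordiv_eq_ediv_of_pos (by omega)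
  have hm0 : 0 < m := by
    have : (0:Int) ≤ pvSqrt2 s := by unfold pvSqrt2; positivity
    omega
  have hlt : (s / 2).toNat.sqrt < m.toNat := by
    unfold pvSqrt2 at hbig; rw [hq] at hbig; omega
  have h2 : (s / 2).toNat < m.toNat * m.toNat := Nat.sqrt_lt.mp hlt
  have h3 : s / 2 < m * m := by
    have hcast : ((s / 2).toNat : Int) < (m.toNat : Int) * (m.toNat : Int) := by exact_mod_cast h2
    rw [Int.toNat_of_nonneg (by positivity), Int.toNat_of_nonneg hm0.le] at hcast
    exact hcast
  have h4 : s ≤ 2 * (s / 2) + 1 := by omega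
  nlinarith

theorem pvBig4 (s n m : Int) (hs : 0 < s) (hn : 1 ≤ n) (hm : n < m) (hbig : pvSqrt4 s < n) :
    s < 2 * m * (m + n) := by
  have hq : PySem.Int.floordiv s 4 = s / 4 := PySem.Int.floordiv_eq_ediv_of_pos (by omega)
  have hlt : (s / 4).toNat.sqrt < n.toNat := by
    unfold pvSqrt4 at hbig; rw [hq] at hbig; omega
  have h2 : (s / 4).toNat < n.toNat * n.toNat := Nat.sqrt_lt.mp hlt
  have h3 : s / 4 < n * n := by
    have hcast : ((s / 4).toNat : Int) < (n.toNat : Int) * (n.toNat : Int) := by exact_mod_cast h2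
    rw [Int.toNat_of_nonneg (by positivity), Int.toNat_of_nonneg (by omega : (0:Int) ≤ n)] at hcast
    exact hcast
  have h4 : s ≤ 4 * (s / 4) + 3 := by omega
  nlinarith

theorem pvRow_eq (s n : Int) (hs : 0 < s) (hn : 1 ≤ n) : pvRowA s n = pvRowB s n := by
  have hsq2s : pvSqrt2 s + 1 ≤ s := by
    have h1 : (s / 2).toNat.sqrt ≤ (s / 2).toNat := Nat.sqrt_le_self _
    have h2 : (s / 2).toNat ≤ s.toNat / 2 := by omega
    unfold pvSqrt2
    rw [PySem.Int.floordiv_eq_ediv_of_pos (by omega : (0:Int) < 2)]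
    omega
  have hAB : pvRowA s n = (PySem.List.pyRange (n + 1) s 1).flatMap (pvContribB s n) := by
    unfold pvRowA
    exact pvFlatMap_congr _ (fun m hmem => by
      have := (PySem.List.mem_pyRange_one).mp hmem
      exact pvContrib_eq s n m hs hn (by omega))
  rw [hAB]
  unfold pvRowB
  by_cases hcase : n + 1 ≤ pvSqrt2 s + 1
  · rw [PySem.List.pyRange_one_append (n + 1) (pvSqrt2 s + 1) s hcase hsq2s,
      List.flatMap_append]
    have hnil : (PySem.List.pyRange (pvSqrt2 s + 1) s 1).flatMap (pvContribB s n) = [] := by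
      rw [List.flatMap_eq_nil_iff]
      intro m hmem
      have hb := (PySem.List.mem_pyRange_one).mp hmem
      exact pvContribB_nil s n m hs (pvBig2 s n m hs hn (by omega))
    rw [hnil, List.append_nil]
  · rw [PySem.List.pyRange_one_eq_nil (by omega : pvSqrt2 s + 1 ≤ n + 1)]
    rw [List.flatMap_nil, List.flatMap_eq_nil_iff]
    intro m hmem
    have hb := (PySem.List.mem_pyRange_one).mp hmem
    exact pvContribB_nil s n m hs (pvBig2 s n m hs hn (by omega))

theorem pvFoldl_flatMap (f : List (List Int) → Int → List (List Int)) (g : Int → List (List Int))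
    (h : ∀ acc x, f acc x = acc ++ g x) : ∀ (l : List Int) (acc), l.foldl f acc = acc ++ l.flatMap g
  | [], acc => by simp
  | x :: l, acc => by
    rw [List.foldl_cons, h, pvFoldl_flatMap f g h l, List.flatMap_cons, List.append_assoc]

theorem pvFoldA (s : Int) :
    get_pythagorian_triples s = (PySem.List.pyRange 1 s 1).flatMap (pvRowA s) := by
  unfold get_pythagorian_triples
  refine (pvFoldl_flatMap _ (pvRowA s) ?_ _ []).trans (List.nil_append _)
  intro acc n
  show List.foldl _ _ _ = _
  refine (pvFoldl_flatMap _ (pvContribA s n) ?_ _ acc).trans ?_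
  · intro acc m
    show (if _ then _ else _) = _
    by_cases h : PySem.Int.mod (m + n) 2 ≠ 0 ∧ Int.gcd m n = 1
    · rw [if_pos h]; unfold pvContribA; rw [if_pos h]
    · rw [if_neg h]; unfold pvContribA; rw [if_neg h, List.append_nil]
  · rfl

theorem pvFoldB (s : Int) (hs : 0 < s) :
    get_pythagorian_triples_alt s = (PySem.List.pyRange 1 (pvSqrt4 s + 1) 1).flatMap (pvRowB s) := by
  unfold get_pythagorian_triples_alt
  rw [if_neg (by omega)]
  refine (pvFoldl_flatMap _ (pvRowB s) ?_ _ []).trans (List.nil_append _)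
  intro acc n
  show List.foldl _ _ _ = _
  refine (pvFoldl_flatMap _ (pvContribB s n) ?_ _ acc).trans ?_
  · intro acc m
    show (if _ then _ else _) = _
    by_cases h : PySem.Int.mod (m + n) 2 = 1 ∧ Int.gcd m n = 1 ∧
        PySem.Int.mod s (2 * m * (m + n)) = 0
    · rw [if_pos h]; unfold pvContribB; rw [if_pos h]
    · rw [if_neg h]; unfold pvContribB; rw [if_neg h, List.append_nil]
  · rfl

-- ===== VERDICT (by name: the statement is the Claim_ definition above) =====
theorem get_pythagorian_triples_spec : Claim_equal_get_pythagorian_triples := by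
  intro s _
  unfold Spec_get_pythagorian_triples
  by_cases hs : s ≤ 0
  · unfold get_pythagorian_triples get_pythagorian_triples_alt
    rw [PySem.List.pyRange_one_eq_nil (by omega : s ≤ 1), if_pos hs]
    rfl
  · rw [pvFoldA, pvFoldB s (by omega)]
    have hsq4s : pvSqrt4 s + 1 ≤ s := by
      have h1 : (s / 4).toNat.sqrt ≤ (s / 4).toNat := Nat.sqrt_le_self _
      unfold pvSqrt4
      rw [PySem.Int.floordiv_eq_ediv_of_pos (by omega : (0:Int) < 4)]
      omega
    rw [pvFlatMap_congr (PySem.List.pyRange 1 s 1) (fun n hmem => by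
      have := (PySem.List.mem_pyRange_one).mp hmem
      exact pvRow_eq s n (by omega) (by omega))]
    rw [PySem.List.pyRange_one_append 1 (pvSqrt4 s + 1) s
      (by unfold pvSqrt4; omega) hsq4s, List.flatMap_append]
    have h0 : (0:Int) ≤ pvSqrt4 s := by unfold pvSqrt4; positivity
    have hnil : (PySem.List.pyRange (pvSqrt4 s + 1) s 1).flatMap (pvRowB s) = [] := by
      rw [List.flatMap_eq_nil_iff]
      intro n hmem
      have hb := (PySem.List.mem_pyRange_one).mp hmem
      unfold pvRowB
      rw [List.flatMap_eq_nil_iff]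
      intro m hmem2
      have hb2 := (PySem.List.mem_pyRange_one).mp hmem2
      exact pvContribB_nil s n m (by omega) (pvBig4 s n m (by omega) (by omega) (by omega) (by omega))
    rw [hnil, List.append_nil]
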